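-- pv_equiv track=rewrite | github.com/shackett/shackett.github.io | scripts/clean_qmd_markdown.py | _find_dash_positions
-- ===== SOURCE A (Python) =====
-- from typing import List, Tuple
--
-- def _find_dash_positions(separator_line: str) -> List[int]:
--     """
--     Find the starting positions of dash groups in a separator line.
--
--     Returns:
--         List of positions where dash groups start
--     """
--     positions = []
--     in_dash_group = False
--
--     for pos, char in enumerate(separator_line):
--         if char == '-' and not in_dash_group:
--             positions.append(pos)
--             in_dash_group = True
--         elif char != '-':
--             in_dash_group = False
--
--     return positions
-- ===== SOURCE B (Python) =====
-- def _find_dash_positions(separator_line):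
--     # Jump from dash group to dash group with str.find instead of scanning
--     # every character with an in-group flag: find the next '-', record it,
--     # skip past its run, and search again from there.
--     positions = []
--     n = len(separator_line)
--     k = separator_line.find('-')
--     while k != -1:
--         positions.append(k)
--         g = k + 1
--         while g < n and separator_line[g] == '-':
--             g += 1
--         k = separator_line.find('-', g)
--     return positions
-- ===== Notes on version B (the rewrite author's own statement) =====
-- stated objective: faster
-- what changed: Instead of A's per-character scan that threads an in_dash_group flag, B jumps from group to group: str.find locates the next dash, its position is recorded, the run of dashes is skipped, and the search resumes after the run.
import Mathlib
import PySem

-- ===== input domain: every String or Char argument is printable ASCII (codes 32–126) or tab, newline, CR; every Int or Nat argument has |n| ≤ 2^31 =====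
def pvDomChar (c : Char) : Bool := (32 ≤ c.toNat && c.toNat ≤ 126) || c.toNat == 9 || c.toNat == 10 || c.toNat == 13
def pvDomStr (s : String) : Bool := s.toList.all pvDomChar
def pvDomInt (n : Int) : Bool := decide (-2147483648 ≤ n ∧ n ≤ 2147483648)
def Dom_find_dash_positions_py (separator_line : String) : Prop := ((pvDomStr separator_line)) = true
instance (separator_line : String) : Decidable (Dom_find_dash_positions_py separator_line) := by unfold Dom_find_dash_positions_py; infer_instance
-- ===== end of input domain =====

-- B jumps from dash group to dash group with str.find and run-skipping instead of A's
-- per-character flag scan (objective: alternative).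

-- ===== PORT A =====
-- A's for-loop: state = (in_dash_group flag, positions accumulator), pos counts up
def pvGoA : List Char → Int → Bool → List Int → List Int
  | [], _, _, acc => acc
  | c :: rest, pos, ind, acc =>
    if c = '-' ∧ ind = false then pvGoA rest (pos + 1) true (acc ++ [pos])
    else if c ≠ '-' then pvGoA rest (pos + 1) false acc
    else pvGoA rest (pos + 1) ind acc

def find_dash_positions_py (separator_line : String) : List Int :=
  pvGoA separator_line.toList 0 false []

-- ===== PORT B =====
-- B's inner while loop: advance g past the run of '-' (indexing is guarded, so getD is exact)
def pvSkipRun (s : List Char) (g : Nat) : Nat :=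
  if g < s.length ∧ s.getD g ' ' = '-' then pvSkipRun s (g + 1) else g
  termination_by s.length - g

-- B's outer while loop; k = current find result (−1 = stop), acc = positions.
-- fuel is only a totality guard (s.length + 1 always suffices: k strictly increases).
-- k comes from find, so k ≥ 0 whenever k ≠ −1 and k.toNat + 1 is Python's k + 1.
def pvGoB (s : List Char) : Nat → Int → List Int → List Int
  | 0, _, acc => acc
  | fuel + 1, k, acc =>
    if k = -1 then acc
    else
      pvGoB s fuel
        (PySem.Chars.findFrom s ['-'] (pvSkipRun s (k.toNat + 1) : Int) none)
        (acc ++ [k])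

def find_dash_positions_py_alt (separator_line : String) : List Int :=
  pvGoB separator_line.toList (separator_line.toList.length + 1)
    (PySem.Str.find separator_line "-") []

-- ===== PRECONDITION & SPEC =====
def Spec_find_dash_positions_py (separator_line : String) (out : List Int) : Prop := out = find_dash_positions_py_alt separator_line
instance (separator_line : String) (out : List Int) : Decidable (Spec_find_dash_positions_py separator_line out) := by unfold Spec_find_dash_positions_py; infer_instance

-- ===== CLAIM (what is proved, stated in full; the proofs are below) =====
def Claim_equal_find_dash_positions_py : Prop := ∀ (separator_line : String), Dom_find_dash_positions_py separator_line → Spec_find_dash_positions_py separator_line (find_dash_positions_py separator_line)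

-- ===== LEMMAS AND PROOFS =====

-- singleton-prefix of a drop ↔ the character there
theorem pvPrefix_drop_iff (s : List Char) (m : Nat) :
    ['-'] <+: s.drop m ↔ m < s.length ∧ s.getD m ' ' = '-' := by
  constructor
  · intro h
    rcases h with ⟨t, ht⟩
    have hm : m < s.length := by
      by_contra hm
      have : s.drop m = [] := List.drop_eq_nil_of_le (by omega)
      rw [this] at ht; simp at ht
    have hd : s.drop m = s[m] :: s.drop (m + 1) := List.drop_eq_getElem_cons hm
    rw [hd] at ht
    have hc : '-' = s[m] := by
      have := congrArg (fun l => l.head?) ht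
      simpa [List.getElem?_eq_getElem hm] using this
    exact ⟨hm, by simp [List.getD, List.getElem?_eq_getElem hm, ← hc]⟩
  · rintro ⟨hm, hc⟩
    have hd : s.drop m = s[m] :: s.drop (m + 1) := List.drop_eq_getElem_cons hm
    rw [hd]
    have hc' : s[m] = '-' := by
      simpa [List.getD, List.getElem?_eq_getElem hm] using hc
    exact ⟨s.drop (m + 1), by simp [hc']⟩

theorem pvGoA_acc (l : List Char) : ∀ (pos : Int) (b : Bool) (acc : List Int),
    pvGoA l pos b acc = acc ++ pvGoA l pos b [] := by
  induction l with
  | nil => intro pos b acc; simp [pvGoA]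
  | cons c rest ih =>
    intro pos b acc
    simp only [pvGoA]
    split_ifs with h1 h2
    · rw [ih _ _ (acc ++ [pos]), ih _ _ ([] ++ [pos])]
      simp
    · exact ih _ _ acc
    · exact ih _ _ acc

-- a stretch of non-dash characters is skipped with the flag false
theorem pvGoA_nodash (s : List Char) (j k : Nat) (hjk : j ≤ k) (hk : k ≤ s.length)
    (hno : ∀ i, j ≤ i → i < k → s.getD i ' ' ≠ '-') :
    pvGoA (s.drop j) (j : Int) false [] = pvGoA (s.drop k) (k : Int) false [] := by
  rcases Nat.eq_or_lt_of_le hjk with h | h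
  · subst h; rfl
  · have hjlen : j < s.length := by omega
    have hd : s.drop j = s[j] :: s.drop (j + 1) := List.drop_eq_getElem_cons hjlen
    have hcj : s[j] ≠ '-' := by
      have := hno j le_rfl (by omega)
      simpa [List.getD, List.getElem?_eq_getElem hjlen] using this
    have step : pvGoA (s.drop j) (j : Int) false [] = pvGoA (s.drop (j + 1)) ((j : Int) + 1) false [] := by
      rw [hd]; simp [pvGoA, hcj]
    rw [step]
    have := pvGoA_nodash s (j + 1) k (by omega) hk (fun i h1 h2 => hno i (by omega) h2)
    simpa using this
  termination_by k - j

-- a stretch of dashes is skipped with the flag true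
theorem pvGoA_dashrun (s : List Char) (j k : Nat) (hjk : j ≤ k) (hk : k ≤ s.length)
    (hall : ∀ i, j ≤ i → i < k → s.getD i ' ' = '-') :
    pvGoA (s.drop j) (j : Int) true [] = pvGoA (s.drop k) (k : Int) true [] := by
  rcases Nat.eq_or_lt_of_le hjk with h | h
  · subst h; rfl
  · have hjlen : j < s.length := by omega
    have hd : s.drop j = s[j] :: s.drop (j + 1) := List.drop_eq_getElem_cons hjlen
    have hcj : s[j] = '-' := by
      have := hall j le_rfl (by omega)
      simpa [List.getD, List.getElem?_eq_getElem hjlen] using this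
    have step : pvGoA (s.drop j) (j : Int) true [] = pvGoA (s.drop (j + 1)) ((j : Int) + 1) true [] := by
      rw [hd]
      simp only [pvGoA, hcj]
      rw [if_neg (by simp), if_neg (by simp)]
    rw [step]
    have := pvGoA_dashrun s (j + 1) k (by omega) hk (fun i h1 h2 => hall i (by omega) h2)
    simpa using this
  termination_by k - j

theorem pvGoA_group_start (s : List Char) (j : Nat) (hj : j < s.length)
    (hc : s.getD j ' ' = '-') :
    pvGoA (s.drop j) (j : Int) false [] = (j : Int) :: pvGoA (s.drop (j + 1)) ((j : Int) + 1) true [] := by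
  have hd : s.drop j = s[j] :: s.drop (j + 1) := List.drop_eq_getElem_cons hj
  have hcj : s[j] = '-' := by
    simpa [List.getD, List.getElem?_eq_getElem hj] using hc
  rw [hd]
  simp only [pvGoA, hcj]
  rw [if_pos (by simp), pvGoA_acc]
  simp

-- once the next character is not a dash (or the string ends), the flag's value is irrelevant
theorem pvGoA_true_false (s : List Char) (g : Nat) (hg : g ≤ s.length)
    (h : g = s.length ∨ s.getD g ' ' ≠ '-') :
    pvGoA (s.drop g) (g : Int) true [] = pvGoA (s.drop g) (g : Int) false [] := by
  rcases Nat.eq_or_lt_of_le hg with he | hlt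
  · rw [List.drop_eq_nil_of_le (by omega)]
    rfl
  · have hcg : s[g] ≠ '-' := by
      rcases h with h | h
      · omega
      · intro hx; exact h (by simp [List.getD, List.getElem?_eq_getElem hlt, hx])
    have hd : s.drop g = s[g] :: s.drop (g + 1) := List.drop_eq_getElem_cons hlt
    rw [hd]
    simp [pvGoA, hcg]

theorem pvSkipRun_spec (s : List Char) (g : Nat) (hg : g ≤ s.length) :
    g ≤ pvSkipRun s g ∧ pvSkipRun s g ≤ s.length ∧
    (∀ i, g ≤ i → i < pvSkipRun s g → s.getD i ' ' = '-') ∧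
    (pvSkipRun s g = s.length ∨ s.getD (pvSkipRun s g) ' ' ≠ '-') := by
  rw [pvSkipRun]
  by_cases h : g < s.length ∧ s.getD g ' ' = '-'
  · rw [if_pos h]
    have hrec := pvSkipRun_spec s (g + 1) (by omega)
    refine ⟨by omega, hrec.2.1, ?_, hrec.2.2.2⟩
    intro i h1 h2
    rcases Nat.eq_or_lt_of_le h1 with he | hlt
    · subst he; exact h.2
    · exact hrec.2.2.1 i hlt h2
  · rw [if_neg h]
    refine ⟨le_rfl, hg, fun i h1 h2 => by omega, ?_⟩
    rcases Nat.eq_or_lt_of_le hg with he | hlt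
    · exact Or.inl he
    · exact Or.inr (fun hc => h ⟨hlt, hc⟩)
  termination_by s.length - g

-- main invariant: B's find-jump loop from index j equals A's flag scan of the suffix
theorem pvGoB_eq (s : List Char) : ∀ (fuel : Nat) (j : Nat) (acc : List Int), j ≤ s.length →
    s.length + 1 - j ≤ fuel →
    pvGoB s fuel
        (if PySem.Chars.find (s.drop j) ['-'] = -1 then -1
         else (j : Int) + PySem.Chars.find (s.drop j) ['-']) acc
      = acc ++ pvGoA (s.drop j) (j : Int) false [] := by
  intro fuel
  induction fuel with
  | zero => intro j acc hj hfuel; omega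
  | succ fuel ih =>
    intro j acc hj hfuel
    by_cases hf : PySem.Chars.find (s.drop j) ['-'] = -1
    · -- no dash in the suffix: both sides are the accumulator
      rw [if_pos hf]
      have hno : ¬ ['-'] <:+: s.drop j := (PySem.Chars.find_eq_neg_one_iff _ _).mp hf
      have hnone : ∀ i, j ≤ i → i < s.length → s.getD i ' ' ≠ '-' := by
        intro i h1 h2 hc
        apply hno
        have hp : ['-'] <+: s.drop i := (pvPrefix_drop_iff s i).mpr ⟨h2, hc⟩
        have hdd : s.drop i = (s.drop j).drop (i - j) := by
          rw [List.drop_drop]; congr 1; omega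
        rw [hdd] at hp
        exact hp.isInfix.trans (List.drop_suffix _ _).isInfix
      rw [pvGoA_nodash s j s.length hj le_rfl hnone,
        List.drop_eq_nil_of_le le_rfl]
      simp [pvGoB, pvGoA]
    · rw [if_neg hf]
      have hf0 : 0 ≤ PySem.Chars.find (s.drop j) ['-'] := by
        have := PySem.Chars.neg_one_le_find (s.drop j) ['-']
        omega
      obtain ⟨hpre, hmin⟩ := PySem.Chars.find_spec hf0
      have hdd : (s.drop j).drop (PySem.Chars.find (s.drop j) ['-']).toNat
          = s.drop (j + (PySem.Chars.find (s.drop j) ['-']).toNat) := by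
        rw [List.drop_drop]
      rw [hdd] at hpre
      obtain ⟨hknlt, hknc⟩ :=
        (pvPrefix_drop_iff s (j + (PySem.Chars.find (s.drop j) ['-']).toNat)).mp hpre
      -- characters in [j, j + find) are not dashes
      have hno : ∀ i, j ≤ i → i < j + (PySem.Chars.find (s.drop j) ['-']).toNat →
          s.getD i ' ' ≠ '-' := by
        intro i h1 h2 hc
        apply hmin (i - j) (by omega)
        have hdd2 : (s.drop j).drop (i - j) = s.drop i := by
          rw [List.drop_drop]; congr 1; omega
        rw [hdd2]
        exact (pvPrefix_drop_iff s i).mpr ⟨by omega, hc⟩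
      -- one step of B
      have hkne : (↑j + PySem.Chars.find (s.drop j) ['-']) ≠ (-1 : Int) := by omega
      have htn : (↑j + PySem.Chars.find (s.drop j) ['-']).toNat
          = j + (PySem.Chars.find (s.drop j) ['-']).toNat := by omega
      simp only [pvGoB]
      rw [if_neg hkne, htn]
      -- the run skip
      obtain ⟨hg1, hg2, hg3, hg4⟩ :=
        pvSkipRun_spec s (j + (PySem.Chars.find (s.drop j) ['-']).toNat + 1) (by omega)
      -- rewrite the next find into the induction form and apply the IH
      rw [PySem.Chars.findFrom_natCast s ['-'] _ hg2]
      rw [ih (pvSkipRun s (j + (PySem.Chars.find (s.drop j) ['-']).toNat + 1))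
        (acc ++ [(↑j + PySem.Chars.find (s.drop j) ['-'] : Int)]) hg2 (by omega)]
      -- now compute A's side
      rw [pvGoA_nodash s j (j + (PySem.Chars.find (s.drop j) ['-']).toNat) (by omega) (by omega) hno,
        pvGoA_group_start s _ hknlt hknc]
      have h1 : pvGoA (s.drop (j + (PySem.Chars.find (s.drop j) ['-']).toNat + 1))
            ((↑(j + (PySem.Chars.find (s.drop j) ['-']).toNat) : Int) + 1) true []
          = pvGoA (s.drop (pvSkipRun s (j + (PySem.Chars.find (s.drop j) ['-']).toNat + 1)))
            (↑(pvSkipRun s (j + (PySem.Chars.find (s.drop j) ['-']).toNat + 1)) : Int) true [] := by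
        have := pvGoA_dashrun s (j + (PySem.Chars.find (s.drop j) ['-']).toNat + 1)
          (pvSkipRun s (j + (PySem.Chars.find (s.drop j) ['-']).toNat + 1)) hg1 hg2 hg3
        simpa using this
      rw [h1, pvGoA_true_false s _ hg2 hg4]
      have hcast : ((j + (PySem.Chars.find (s.drop j) ['-']).toNat : Nat) : Int)
          = ↑j + PySem.Chars.find (s.drop j) ['-'] := by omega
      rw [hcast]
      simp

-- ===== VERDICT (by name: the statement is the Claim_ definition above) =====
theorem find_dash_positions_py_spec : Claim_equal_find_dash_positions_py := by
  intro s _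
  unfold Spec_find_dash_positions_py find_dash_positions_py find_dash_positions_py_alt
  have h := pvGoB_eq s.toList (s.toList.length + 1) 0 [] (by omega) (by omega)
  rw [List.drop_zero] at h
  have hfind : PySem.Str.find s "-" =
      (if PySem.Chars.find s.toList ['-'] = -1 then -1
       else ((0 : Nat) : Int) + PySem.Chars.find s.toList ['-']) := by
    have : PySem.Str.find s "-" = PySem.Chars.find s.toList ['-'] := by
      simp [PySem.Str.find_eq]
    rw [this]
    by_cases hf : PySem.Chars.find s.toList ['-'] = -1
    · simp [hf]
    · simp [hf]
  rw [hfind]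
  simpa using h.symm
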